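-- pv_equiv track=rewrite | github.com/Junnjjj/Algorithm | Sample_Question/String2/4659.py | solution
-- ===== SOURCE A (Python) =====
-- def solution(string):
-- 	vowel = ['a','e','i','o','u']
--
-- 	check = 0
-- 	for v in vowel:
-- 		if v not in string:
-- 			check += 1
--
-- 	if check == 5:
-- 		return False
--
-- 	for i in range(1,len(string)):
-- 		if string[i] == string[i-1]:
--
-- 			if string[i] == 'e' or string[i] == 'o':
-- 				continue
-- 			else:
-- 				return False
--
-- 	check = 1 if string[0] in vowel else 0
-- 	check2 = 1 if string[0] not in vowel else 0
--
-- 	for i in range(1,len(string)):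
-- 		if string[i] in vowel:
-- 			check += 1
-- 			check2 = 0
-- 		else:
-- 			check2 += 1
-- 			check = 0
--
-- 		if check == 3 or check2 == 3:
-- 			return False
--
-- 	return True
-- ===== SOURCE B (Python) =====
-- def solution(string):
--     vowels = 'aeiou'
--     cls = ['V' if c in vowels else 'C' for c in string]
--     return ('V' in cls
--             and all(not (x == y == z) for x, y, z in zip(cls, cls[1:], cls[2:]))
--             and all(a != b or b in 'eo' for a, b in zip(string, string[1:])))
-- ===== Notes on version B (the rewrite author's own statement) =====
-- stated objective: simpler
-- what changed: B replaces A's stateful early-return scans with counters by a stateless declarative check: project the string onto a V/C classification list and test three window predicates (a 'V' occurs, no all-equal class trigram, every equal adjacent pair is 'ee' or 'oo').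
import Mathlib
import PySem

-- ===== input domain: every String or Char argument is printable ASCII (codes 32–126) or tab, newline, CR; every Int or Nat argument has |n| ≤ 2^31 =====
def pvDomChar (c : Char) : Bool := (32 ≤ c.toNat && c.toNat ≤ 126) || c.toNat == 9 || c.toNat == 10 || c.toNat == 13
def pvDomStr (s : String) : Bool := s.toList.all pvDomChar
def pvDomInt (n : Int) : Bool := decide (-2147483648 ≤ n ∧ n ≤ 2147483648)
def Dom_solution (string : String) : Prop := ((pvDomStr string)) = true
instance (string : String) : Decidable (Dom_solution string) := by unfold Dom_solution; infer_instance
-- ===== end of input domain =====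

-- B replaces A's stateful counter scans by stateless sliding-window checks on a V/C
-- classification list: no early returns, no counters (objective: simpler).

-- ===== PORT A =====
def pvVowel : List Char := ['a', 'e', 'i', 'o', 'u']

-- A's second loop: for i in range(1,len): compare string[i] with string[i-1], early return False
def pvAdjA : Char → List Char → Bool
  | _, [] => true
  | prev, c :: rest =>
    if c == prev then
      (if c == 'e' || c == 'o' then pvAdjA c rest else false)
    else pvAdjA c rest

-- A's third loop: maintain check/check2, early return False when either hits 3
def pvRunA : List Char → Int → Int → Bool
  | [], _, _ => true
  | c :: rest, check, check2 =>
    let check' : Int := if c ∈ pvVowel then check + 1 else 0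
    let check2' : Int := if c ∈ pvVowel then 0 else check2 + 1
    if check' == 3 || check2' == 3 then false else pvRunA rest check' check2'

def solution (string : String) : Bool :=
  let cs := string.toList
  -- first loop: count the vowels not occurring in string
  let check : Int := pvVowel.foldl (fun acc v => if v ∈ cs then acc else acc + 1) 0
  if check == 5 then false
  else
    match cs with
    | [] => false  -- unreachable: check ≠ 5 forces a vowel in cs
    | c :: rest =>
      if pvAdjA c rest == false then false
      else
        let ch : Int := if c ∈ pvVowel then 1 else 0
        let ch2 : Int := if c ∈ pvVowel then 0 else 1
        pvRunA rest ch ch2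

-- ===== PORT B =====
def pvVowelsB : List Char := ['a', 'e', 'i', 'o', 'u']

def solution_alt (string : String) : Bool :=
  let cs := string.toList
  let cls := cs.map (fun c => if c ∈ pvVowelsB then 'V' else 'C')
  cls.contains 'V'
    && ((cls.zip (cls.drop 1)).zip (cls.drop 2)).all
        (fun p => !(p.1.1 == p.1.2 && p.1.2 == p.2))
    && (cs.zip (cs.drop 1)).all (fun p => p.1 != p.2 || p.2 ∈ (['e', 'o'] : List Char))

-- ===== PRECONDITION & SPEC =====
def Spec_solution (string : String) (out : Bool) : Prop := out = solution_alt string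
instance (string : String) (out : Bool) : Decidable (Spec_solution string out) := by unfold Spec_solution; infer_instance

-- ===== CLAIM (what is proved, stated in full; the proofs are below) =====
def Claim_equal_solution : Prop := ∀ (string : String), Dom_solution string → Spec_solution string (solution string)

-- ===== LEMMAS AND PROOFS =====

-- class of a character, as B's map computes it
def pvCls (c : Char) : Char := if c ∈ pvVowelsB then 'V' else 'C'

-- recursive form of B's trigram window check
def pvTri : List Char → Bool
  | x :: y :: z :: t => (!(x == y && y == z)) && pvTri (y :: z :: t)
  | _ => true

-- B's zip-zip-all trigram check equals the recursive form
theorem pv_tri_eq : ∀ l : List Char,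
    ((l.zip (l.drop 1)).zip (l.drop 2)).all (fun p => !(p.1.1 == p.1.2 && p.1.2 == p.2)) = pvTri l := by
  intro l
  induction l with
  | nil => rfl
  | cons x l ih =>
    cases l with
    | nil => rfl
    | cons y l' =>
      cases l' with
      | nil => rfl
      | cons z t =>
        simp only [List.drop, List.zip_cons_cons, List.all_cons, pvTri] at ih ⊢
        rw [← ih]

theorem pv_tri_skip {x y : Char} (h : x ≠ y) (l : List Char) :
    pvTri (x :: y :: l) = pvTri (y :: l) := by
  cases l with
  | nil => rfl
  | cons z t => simp [pvTri, h]

-- the guards agree: "all five vowels missing" (A) iff 'V' not in the class list (B)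
theorem pv_guard (cs : List Char) :
    ((pvVowel.foldl (fun acc v => if v ∈ cs then acc else acc + 1) 0 : Int) == 5) =
      !(cs.map pvCls).contains 'V' := by
  rw [Bool.eq_iff_iff]
  have hmap : ((cs.map pvCls).contains 'V' = true) ↔ ∃ c ∈ cs, c ∈ pvVowelsB := by
    simp only [List.contains_eq_mem, decide_eq_true_eq, List.mem_map, pvCls]
    constructor
    · rintro ⟨c, hc, hv⟩
      by_cases h : c ∈ pvVowelsB
      · exact ⟨c, hc, h⟩
      · simp [h] at hv
    · rintro ⟨c, hc, h⟩; exact ⟨c, hc, by simp [h]⟩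
  simp only [beq_iff_eq, Bool.not_eq_true', ← Bool.not_eq_true, hmap]
  have hsplit : (∃ c ∈ cs, c ∈ pvVowelsB) ↔
      ('a' ∈ cs ∨ 'e' ∈ cs ∨ 'i' ∈ cs ∨ 'o' ∈ cs ∨ 'u' ∈ cs) := by
    constructor
    · rintro ⟨c, hc, hv⟩
      simp only [pvVowelsB, List.mem_cons, List.not_mem_nil, or_false] at hv
      rcases hv with h | h | h | h | h <;> subst h <;> tauto
    · rintro (h | h | h | h | h) <;> exact ⟨_, h, by decide⟩
  rw [hsplit]
  by_cases ha : 'a' ∈ cs <;> by_cases he : 'e' ∈ cs <;> by_cases hi : 'i' ∈ cs <;>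
    by_cases ho : 'o' ∈ cs <;> by_cases hu : 'u' ∈ cs <;>
    simp [pvVowel, List.foldl, ha, he, hi, ho, hu]

-- A's adjacency pass equals B's bigram window check
theorem pv_adj (rest : List Char) : ∀ prev : Char,
    pvAdjA prev rest =
      ((prev :: rest).zip ((prev :: rest).drop 1)).all
        (fun p => p.1 != p.2 || p.2 ∈ (['e', 'o'] : List Char)) := by
  induction rest with
  | nil => intro prev; rfl
  | cons x t ih =>
    intro prev
    simp only [List.drop, List.zip_cons_cons, List.all_cons, pvAdjA]
    have ih' := ih x
    simp only [List.drop_one, List.tail_cons] at ih'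
    rw [← ih']
    by_cases hp : x = prev
    · subst hp
      by_cases he : x = 'e' <;> by_cases ho : x = 'o' <;> simp [he, ho, bne]
    · have hxp : (x == prev) = false := by simp [hp]
      have hpx : ¬ prev = x := fun h => hp h.symm
      simp only [hxp, Bool.false_eq_true, if_false, bne]
      cases hAd : pvAdjA x t <;> simp [hpx]

-- A's run-counter pass equals B's trigram check, padded with the current run
theorem pv_run (rest : List Char) : ∀ (k : Char) (n : Nat), (k = 'V' ∨ k = 'C') → n ≤ 2 →
    pvRunA rest (if k == 'V' then (n : Int) else 0) (if k == 'C' then (n : Int) else 0) =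
      pvTri (List.replicate n k ++ rest.map pvCls) := by
  induction rest with
  | nil =>
    intro k n hk hn
    interval_cases n <;> rcases hk with h | h <;> subst h <;> rfl
  | cons c t ih =>
    intro k n hk hn
    have hrep : ∀ (m : Nat) (a : Char) (l : List Char),
        List.replicate m a ++ (a :: l) = List.replicate (m + 1) a ++ l := by
      intro m a l
      rw [List.replicate_succ', List.append_assoc]
      rfl
    by_cases hv : c ∈ pvVowelsB
    · -- class 'V'
      have hcls : pvCls c = 'V' := by simp [pvCls, hv]
      have hvA : c ∈ pvVowel := hv
      rcases hk with h | h <;> subst h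
      · -- previous run of n 'V's
        simp only [pvRunA, List.map_cons, hcls, if_pos hvA, hrep]
        interval_cases n
        · have := ih 'V' 1 (Or.inl rfl) (by omega)
          norm_num at this ⊢
          simpa [List.replicate_succ] using this
        · have := ih 'V' 2 (Or.inl rfl) (by omega)
          norm_num at this ⊢
          simpa [List.replicate_succ] using this
        · -- run reaches 3
          norm_num
          simp [List.replicate_succ, pvTri]
      · -- previous run of n 'C's: counters (0, n) → (1, 0)
        simp only [pvRunA, List.map_cons, hcls, if_pos hvA]
        have hrec := ih 'V' 1 (Or.inl rfl) (by omega)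
        norm_num at hrec
        interval_cases n <;>
          simpa [pvTri, List.replicate_succ, List.replicate_zero,
            pv_tri_skip (show 'C' ≠ 'V' by decide)] using hrec
    · -- class 'C'
      have hcls : pvCls c = 'C' := by simp [pvCls, hv]
      have hvA : c ∉ pvVowel := hv
      rcases hk with h | h <;> subst h
      · -- previous run of n 'V's: counters (n, 0) → (0, 1)
        simp only [pvRunA, List.map_cons, hcls, if_neg hvA]
        have hrec := ih 'C' 1 (Or.inr rfl) (by omega)
        norm_num at hrec
        interval_cases n <;>
          simpa [pvTri, List.replicate_succ, List.replicate_zero,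
            pv_tri_skip (show 'V' ≠ 'C' by decide)] using hrec
      · simp only [pvRunA, List.map_cons, hcls, if_neg hvA, hrep]
        interval_cases n
        · have := ih 'C' 1 (Or.inr rfl) (by omega)
          norm_num at this ⊢
          simpa [List.replicate_succ] using this
        · have := ih 'C' 2 (Or.inr rfl) (by omega)
          norm_num at this ⊢
          simpa [List.replicate_succ] using this
        · norm_num
          simp [List.replicate_succ, pvTri]

-- ===== VERDICT (by name: the statement is the Claim_ definition above) =====
theorem solution_spec : Claim_equal_solution := by
  intro s _
  unfold Spec_solution solution solution_alt
  have hclsfun : (fun c => if c ∈ pvVowelsB then 'V' else 'C') = pvCls := rfl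
  simp only [hclsfun, pv_guard s.toList, pv_tri_eq]
  by_cases hg : ((s.toList.map pvCls).contains 'V') = true
  · simp only [hg, Bool.not_true, Bool.true_and, Bool.false_eq_true, if_false]
    cases hcs : s.toList with
    | nil => rw [hcs] at hg; simp at hg
    | cons c rest =>
      have hadj := pv_adj rest c
      simp only [List.drop_one, List.tail_cons] at hadj
      show (if (pvAdjA c rest == false) = true then false
            else pvRunA rest (if c ∈ pvVowel then 1 else 0) (if c ∈ pvVowel then 0 else 1)) =
        (pvTri (List.map pvCls (c :: rest)) &&
          ((c :: rest).zip rest).all fun p => p.1 != p.2 || decide (p.2 ∈ (['e', 'o'] : List Char)))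
      rw [← hadj]
      have hrun : (pvRunA rest (if c ∈ pvVowel then 1 else 0) (if c ∈ pvVowel then 0 else 1)) =
          pvTri (List.map pvCls (c :: rest)) := by
        by_cases h : c ∈ pvVowelsB
        · have hr := pv_run rest 'V' 1 (Or.inl rfl) (by omega)
          norm_num at hr
          simpa [List.map_cons, pvCls, h, show c ∈ pvVowel from h,
            List.replicate_succ] using hr
        · have hr := pv_run rest 'C' 1 (Or.inr rfl) (by omega)
          norm_num at hr
          simpa [List.map_cons, pvCls, h, show c ∉ pvVowel from h,
            List.replicate_succ] using hr
      by_cases ha : pvAdjA c rest = false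
      · simp [ha]
      · simp only [Bool.not_eq_false] at ha
        simp [ha, hrun, Bool.and_comm]
  · simp only [Bool.not_eq_true] at hg
    simp only [hg, Bool.not_false, Bool.false_and]
    simp
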